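-- pv_equiv track=rewrite | github.com/ScarletMcLearn/Notebooks | amzAnalysis.py | advmodFixer
-- ===== SOURCE A (Python) =====
-- def advmodFixer(relWords,depPairs):
--     '''如果在清單內的形容詞有被副詞修飾，那就將那個形容詞改為 修飾該形容詞的副詞_該形容詞。
--        此為網頁呈現之用。'''
--     relWords=list(relWords)
--     relWords_cp=relWords[:]
--     for relWord in relWords_cp:
--         for depPair in depPairs:
--             if(relWord[0]==depPair[0]) and (depPair[2] == 'advmod'):
--                 #relWords.remove(relWord)
--                 relWords.append((depPair[1]+'_'+depPair[0],depPair[2]))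
--             if(relWord[0]==depPair[1]) and (depPair[2] == 'advmod'):
--                 #relWords.remove(relWord)
--                 relWords.append((depPair[0]+'_'+depPair[1],depPair[2]))
--     return relWords
-- ===== SOURCE B (Python) =====
-- def advmodFixer(relWords, depPairs):
--     '''Same result as A: index advmod depPairs by both endpoints once, then
--        extend per relWord via a single dict lookup.'''
--     idx = {}
--     for dp in depPairs:
--         if dp[2] == 'advmod':
--             idx.setdefault(dp[0], []).append((dp[1] + '_' + dp[0], dp[2]))
--             idx.setdefault(dp[1], []).append((dp[0] + '_' + dp[1], dp[2]))
--     out = list(relWords)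
--     for relWord in relWords:
--         out.extend(idx.get(relWord[0], []))
--     return out
-- ===== Notes on version B (the rewrite author's own statement) =====
-- stated objective: faster
-- what changed: Instead of rescanning all depPairs for every relWord (nested loops), B builds a dict indexing each advmod depPair's expansion entries under both endpoint words in one pass, then extends the output per relWord with a single dict lookup.
import Mathlib
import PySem

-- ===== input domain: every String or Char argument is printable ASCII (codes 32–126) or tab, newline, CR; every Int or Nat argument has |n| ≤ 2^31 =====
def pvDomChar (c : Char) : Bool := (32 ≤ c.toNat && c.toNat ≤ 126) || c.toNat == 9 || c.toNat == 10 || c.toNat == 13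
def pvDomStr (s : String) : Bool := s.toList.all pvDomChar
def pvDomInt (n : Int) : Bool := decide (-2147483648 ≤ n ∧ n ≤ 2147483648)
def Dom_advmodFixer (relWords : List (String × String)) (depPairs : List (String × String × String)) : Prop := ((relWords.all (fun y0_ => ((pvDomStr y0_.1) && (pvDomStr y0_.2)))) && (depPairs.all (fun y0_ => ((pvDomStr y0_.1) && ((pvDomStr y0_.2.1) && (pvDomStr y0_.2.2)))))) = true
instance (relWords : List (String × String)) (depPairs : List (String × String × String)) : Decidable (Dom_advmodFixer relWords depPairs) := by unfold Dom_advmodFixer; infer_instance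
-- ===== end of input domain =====

-- B builds a dict index of advmod depPairs by both endpoints once, replacing A's
-- inner scan of depPairs per relWord with a single dict lookup (objective: faster).

-- ===== PORT A =====
def advmodFixer (relWords : List (String × String)) (depPairs : List (String × String × String)) : List (String × String) :=
  relWords.foldl (fun acc relWord =>
    depPairs.foldl (fun acc dp =>
      let acc1 := if relWord.1 == dp.1 && dp.2.2 == "advmod"
        then acc ++ [(dp.2.1 ++ "_" ++ dp.1, dp.2.2)] else acc
      if relWord.1 == dp.2.1 && dp.2.2 == "advmod"
        then acc1 ++ [(dp.1 ++ "_" ++ dp.2.1, dp.2.2)] else acc1) acc) relWords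

-- ===== PORT B =====
-- idx.setdefault(k, []).append(v)  ==  d.modify k [] (· ++ [v])
def advmodBuildIdx (depPairs : List (String × String × String)) : PySem.Dict String (List (String × String)) :=
  depPairs.foldl (fun d dp =>
    if dp.2.2 == "advmod" then
      (d.modify dp.1 [] (· ++ [(dp.2.1 ++ "_" ++ dp.1, dp.2.2)])).modify dp.2.1 []
        (· ++ [(dp.1 ++ "_" ++ dp.2.1, dp.2.2)])
    else d) PySem.Dict.empty

def advmodFixer_alt (relWords : List (String × String)) (depPairs : List (String × String × String)) : List (String × String) :=
  let idx := advmodBuildIdx depPairs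
  relWords.foldl (fun out relWord => out ++ idx.getD relWord.1 []) relWords

-- ===== PRECONDITION & SPEC =====
def Spec_advmodFixer (relWords : List (String × String)) (depPairs : List (String × String × String)) (out : List (String × String)) : Prop := out = advmodFixer_alt relWords depPairs
instance (relWords : List (String × String)) (depPairs : List (String × String × String)) (out : List (String × String)) : Decidable (Spec_advmodFixer relWords depPairs out) := by unfold Spec_advmodFixer; infer_instance

-- ===== CLAIM (what is proved, stated in full; the proofs are below) =====
def Claim_equal_advmodFixer : Prop := ∀ (relWords : List (String × String)) (depPairs : List (String × String × String)), Dom_advmodFixer relWords depPairs → Spec_advmodFixer relWords depPairs (advmodFixer relWords depPairs)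

-- ===== LEMMAS AND PROOFS =====

-- the entries A appends (in order) for one word w
def advStep (w : String) (l : List (String × String)) (dp : String × String × String) : List (String × String) :=
  let l1 := if w == dp.1 && dp.2.2 == "advmod"
    then l ++ [(dp.2.1 ++ "_" ++ dp.1, dp.2.2)] else l
  if w == dp.2.1 && dp.2.2 == "advmod"
    then l1 ++ [(dp.1 ++ "_" ++ dp.2.1, dp.2.2)] else l1

def perW (depPairs : List (String × String × String)) (w : String) : List (String × String) :=
  depPairs.foldl (advStep w) []

theorem advStep_acc (w : String) (l : List (String × String)) (dp : String × String × String) :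
    advStep w l dp = l ++ advStep w [] dp := by
  unfold advStep
  split_ifs <;> simp

theorem foldl_advStep_acc (w : String) (dps : List (String × String × String))
    (l : List (String × String)) :
    dps.foldl (advStep w) l = l ++ perW dps w := by
  induction dps generalizing l with
  | nil => simp [perW]
  | cons dp dps ih =>
    simp only [List.foldl_cons]
    rw [ih, advStep_acc w l dp]
    conv_rhs => rw [perW, List.foldl_cons]
    rw [ih (advStep w [] dp)]
    simp [List.append_assoc]

theorem getD_buildIdx_from (dps : List (String × String × String))
    (d : PySem.Dict String (List (String × String))) (w : String) :
    (dps.foldl (fun d dp =>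
      if dp.2.2 == "advmod" then
        (d.modify dp.1 [] (· ++ [(dp.2.1 ++ "_" ++ dp.1, dp.2.2)])).modify dp.2.1 []
          (· ++ [(dp.1 ++ "_" ++ dp.2.1, dp.2.2)])
      else d) d).getD w [] = d.getD w [] ++ perW dps w := by
  induction dps generalizing d with
  | nil => simp [perW]
  | cons dp dps ih =>
    simp only [List.foldl_cons]
    rw [perW, List.foldl_cons, foldl_advStep_acc]
    by_cases hadv : dp.2.2 = "advmod"
    · simp only [hadv, beq_self_eq_true, if_true]
      rw [ih]
      simp only [PySem.Dict.getD_modify]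
      unfold advStep
      simp only [hadv, beq_self_eq_true, Bool.and_true]
      by_cases h1 : w = dp.1 <;> by_cases h2 : w = dp.2.1 <;>
        simp_all [List.append_assoc]
    · have : (dp.2.2 == "advmod") = false := by simp [hadv]
      rw [this]
      simp only [if_false, Bool.false_eq_true]
      rw [ih]
      unfold advStep
      simp [this]

theorem getD_buildIdx (dps : List (String × String × String)) (w : String) :
    (advmodBuildIdx dps).getD w [] = perW dps w := by
  unfold advmodBuildIdx
  rw [getD_buildIdx_from]
  simp [PySem.Dict.getD_empty]

-- ===== VERDICT (by name: the statement is the Claim_ definition above) =====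
theorem advmodFixer_spec : Claim_equal_advmodFixer := by
  intro relWords depPairs _
  unfold Spec_advmodFixer advmodFixer advmodFixer_alt
  apply PySem.List.foldl_congr_mem
  intro acc rw _
  show depPairs.foldl _ acc = acc ++ (advmodBuildIdx depPairs).getD rw.1 []
  rw [getD_buildIdx]
  exact foldl_advStep_acc rw.1 depPairs acc
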